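-- pv_equiv track=rewrite | github.com/Mr-joep/DNS-brutforce | old/dns-brutforce-v13.py | generate_subdomains
-- ===== SOURCE A (Python) =====
-- def generate_subdomains(characters, max_length):
--     subdomains = set()
--     for length in range(1, max_length + 1):
--         for i in range(len(characters) ** length):
--             subdomain = ''
--             index = i
--             for _ in range(length):
--                 subdomain = characters[index % len(characters)] + subdomain
--                 index //= len(characters)
--             subdomains.add(subdomain + '.google.com')
--     return list(subdomains)
-- ===== SOURCE B (Python) =====
-- def generate_subdomains(characters, max_length):
--     subdomains = set()
--     words = ['']
--     for _ in range(max_length):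
--         words = [w + c for w in words for c in characters]
--         for w in words:
--             subdomains.add(w + '.google.com')
--     return list(subdomains)
-- ===== Notes on version B (the rewrite author's own statement) =====
-- stated objective: alternative
-- what changed: Replaces the per-index base-N decoding (pow, %, // for every character of every candidate) by iterated prefix extension: the words of length k+1 are built from the words of length k by appending each character, so no index arithmetic happens at all.
import Mathlib
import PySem

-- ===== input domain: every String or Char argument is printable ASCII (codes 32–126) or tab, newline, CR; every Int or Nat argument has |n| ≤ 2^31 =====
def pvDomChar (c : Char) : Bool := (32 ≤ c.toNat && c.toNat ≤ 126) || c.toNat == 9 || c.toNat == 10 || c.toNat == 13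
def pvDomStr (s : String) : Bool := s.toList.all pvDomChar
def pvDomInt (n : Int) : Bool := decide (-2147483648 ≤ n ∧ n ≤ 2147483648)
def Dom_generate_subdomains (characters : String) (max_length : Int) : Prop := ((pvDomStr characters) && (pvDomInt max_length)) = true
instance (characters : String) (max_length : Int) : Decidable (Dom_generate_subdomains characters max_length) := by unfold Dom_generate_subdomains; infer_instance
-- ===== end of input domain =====

-- B replaces A's per-index base-N decoding (pow, %, //) by iterated prefix extension
-- (words of length k+1 = words of length k, each extended by every character): same
-- result with no index arithmetic at all. Equal return value; no side effects.

-- ===== PORT A =====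
-- literal port of A: a set accumulated over lengths 1..max_length; for each index i the
-- word is decoded digit by digit with i % len and i // len, prepending each character.
-- (len(characters) ** length: the exponent, a loop value of range(1, …), is ≥ 1, so .toNat is exact;
--  characters[index % len]: ported with pyGet?; the mod index is in range whenever the loop runs.)
def generate_subdomains (characters : String) (max_length : Int) : List String :=
  let cs := characters.toList
  let subdomains : PySem.Set String :=
    (PySem.List.pyRange 1 (max_length + 1) 1).foldl
      (fun subdomains length =>
        (PySem.List.pyRange 0 ((cs.length : Int) ^ length.toNat) 1).foldl
          (fun subdomains i =>
            let p :=
              (PySem.List.pyRange 0 length 1).foldl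
                (fun (st : List Char × Int) _ =>
                  ((PySem.List.pyGet? cs (PySem.Int.mod st.2 (cs.length : Int))).getD default :: st.1,
                   PySem.Int.floordiv st.2 (cs.length : Int)))
                ([], i)
            PySem.Set.add subdomains (String.ofList (p.1 ++ ".google.com".toList)))
          subdomains)
      PySem.Set.empty
  subdomains

-- ===== PORT B =====
-- literal port of B: state = (set, words); each iteration extends every word by every
-- character and adds all the new words (with the suffix) to the set.
def generate_subdomains_alt (characters : String) (max_length : Int) : List String :=
  let cs := characters.toList
  let res :=
    (PySem.List.pyRange 0 max_length 1).foldl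
      (fun (st : PySem.Set String × List (List Char)) _ =>
        let words := st.2.flatMap (fun w => cs.map (fun c => w ++ [c]))
        (words.foldl (fun s w => PySem.Set.add s (String.ofList (w ++ ".google.com".toList))) st.1,
         words))
      (PySem.Set.empty, [[]])
  res.1

-- ===== PRECONDITION & SPEC =====
def Spec_generate_subdomains (characters : String) (max_length : Int) (out : List String) : Prop := out = generate_subdomains_alt characters max_length
instance (characters : String) (max_length : Int) (out : List String) : Decidable (Spec_generate_subdomains characters max_length out) := by unfold Spec_generate_subdomains; infer_instance

-- ===== CLAIM (what is proved, stated in full; the proofs are below) =====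
def Claim_equal_generate_subdomains : Prop := ∀ (characters : String) (max_length : Int), Dom_generate_subdomains characters max_length → Spec_generate_subdomains characters max_length (generate_subdomains characters max_length)

-- ===== LEMMAS AND PROOFS =====

-- the word list B holds after t iterations: all length-t digit strings, prefix-major
def pvWords (cs : List Char) : Nat → List (List Char)
  | 0 => [[]]
  | t + 1 => (pvWords cs t).flatMap (fun w => cs.map (fun c => w ++ [c]))

-- A's decoded word of length k for a nonnegative index i, in Nat arithmetic
def pvDec (cs : List Char) : Nat → Nat → List Char
  | 0, _ => []
  | k + 1, i => pvDec cs k (i / cs.length) ++ [cs.getD (i % cs.length) default]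

-- one pass of A's innermost loop on (accumulated word, index)
def pvStep (cs : List Char) (st : List Char × Int) : List Char × Int :=
  ((PySem.List.pyGet? cs (PySem.Int.mod st.2 (cs.length : Int))).getD default :: st.1,
   PySem.Int.floordiv st.2 (cs.length : Int))

-- A's loop body for one value of `length` (definitionally the port's outer fold step)
def pvStepA (cs : List Char) (len : Int) (S : PySem.Set String) : PySem.Set String :=
  (PySem.List.pyRange 0 ((cs.length : Int) ^ len.toNat) 1).foldl
    (fun subdomains i =>
      let p := (PySem.List.pyRange 0 len 1).foldl (fun st _ => pvStep cs st) ([], i)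
      PySem.Set.add subdomains (String.ofList (p.1 ++ ".google.com".toList)))
    S

-- B's loop body (definitionally the port's fold step)
def pvStepB (cs : List Char) (st : PySem.Set String × List (List Char)) :
    PySem.Set String × List (List Char) :=
  let words := st.2.flatMap (fun w => cs.map (fun c => w ++ [c]))
  (words.foldl (fun s w => PySem.Set.add s (String.ofList (w ++ ".google.com".toList))) st.1,
   words)

lemma foldl_const_iterate {α β : Type} (f : α → α) (l : List β) (s : α) :
    l.foldl (fun a _ => f a) s = f^[l.length] s := by
  induction l generalizing s with
  | nil => rfl
  | cons x xs ih => simp [List.foldl_cons, ih, Function.iterate_succ_apply]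

lemma pvStep_iterate_acc (cs : List Char) (k : Nat) :
    ∀ (acc : List Char) (j : Int),
      ((pvStep cs)^[k] (acc, j)).1 = ((pvStep cs)^[k] ([], j)).1 ++ acc := by
  induction k with
  | zero => intro acc j; simp
  | succ k ih =>
      intro acc j
      simp only [Function.iterate_succ_apply, pvStep]
      rw [ih, ih ([(PySem.List.pyGet? cs (PySem.Int.mod j (cs.length : Int))).getD default])]
      simp

lemma pvStep_iterate_nat (cs : List Char) (k : Nat) :
    ∀ i : Nat, ((pvStep cs)^[k] ([], (i : Int))).1 = pvDec cs k i := by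
  induction k with
  | zero => intro i; rfl
  | succ k ih =>
      intro i
      simp only [Function.iterate_succ_apply, pvStep]
      rw [pvStep_iterate_acc, PySem.Int.floordiv_natCast, PySem.Int.mod_natCast, ih,
          PySem.List.pyGet?_natCast]
      simp [pvDec, List.getD_eq_getElem?_getD]

lemma map_getD_range {α : Type} [Inhabited α] (l : List α) :
    (List.range l.length).map (fun r => l.getD r default) = l := by
  induction l with
  | nil => rfl
  | cons x xs ih =>
      rw [List.length_cons, List.range_succ_eq_map]
      simp only [List.map_cons, List.map_map]
      simp only [Function.comp_def, Nat.succ_eq_add_one, List.getD_cons_succ, List.getD_cons_zero]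
      rw [ih]

lemma pvDec_mul_add (cs : List Char) (k q r : Nat) (hr : r < cs.length) :
    pvDec cs (k + 1) (q * cs.length + r) = pvDec cs k q ++ [cs.getD r default] := by
  have hN : 0 < cs.length := by omega
  have h1 : (q * cs.length + r) / cs.length = q := by
    rw [mul_comm, Nat.mul_add_div hN, Nat.div_eq_of_lt hr, Nat.add_zero]
  have h2 : (q * cs.length + r) % cs.length = r := by
    rw [mul_comm, Nat.mul_add_mod, Nat.mod_eq_of_lt hr]
  simp only [pvDec, h1, h2]

lemma map_pvDec_range_mul (cs : List Char) (k : Nat) (q : Nat) :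
    (List.range (q * cs.length)).map (pvDec cs (k + 1)) =
      ((List.range q).map (pvDec cs k)).flatMap (fun w => cs.map (fun c => w ++ [c])) := by
  induction q with
  | zero => simp
  | succ q ih =>
      rw [Nat.succ_mul, List.range_add, List.map_append, ih,
          List.range_succ, List.map_append, List.flatMap_append]
      congr 1
      simp only [List.map_cons, List.map_nil, List.flatMap_cons, List.flatMap_nil,
        List.append_nil]
      calc ((List.range cs.length).map (fun x => q * cs.length + x)).map (pvDec cs (k + 1))
          = (List.range cs.length).map (fun r => pvDec cs (k + 1) (q * cs.length + r)) := by
            rw [List.map_map]; rfl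
        _ = (List.range cs.length).map (fun r => pvDec cs k q ++ [cs.getD r default]) := by
            refine List.map_congr_left (fun r hr => ?_)
            exact pvDec_mul_add cs k q r (List.mem_range.mp hr)
        _ = ((List.range cs.length).map (fun r => cs.getD r default)).map
              (fun c => pvDec cs k q ++ [c]) := by rw [List.map_map]; rfl
        _ = cs.map (fun c => pvDec cs k q ++ [c]) := by rw [map_getD_range]

lemma map_pvDec_range_pow (cs : List Char) (k : Nat) :
    (List.range (cs.length ^ k)).map (pvDec cs k) = pvWords cs k := by
  induction k with
  | zero => simp [pvDec, pvWords]
  | succ k ih => rw [pow_succ, map_pvDec_range_mul, ih]; rfl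

lemma pvInner_eq (cs : List Char) (t i : Nat) :
    ((PySem.List.pyRange 0 (1 + (t : Int)) 1).foldl (fun st _ => pvStep cs st) ([], (i : Int))).1
      = pvDec cs (t + 1) i := by
  rw [foldl_const_iterate]
  have hlen : (PySem.List.pyRange 0 (1 + (t : Int)) 1).length = t + 1 := by
    rw [PySem.List.length_pyRange_one]; omega
  rw [hlen, pvStep_iterate_nat]

lemma pvStepA_words (cs : List Char) (t : Nat) (S : PySem.Set String) :
    pvStepA cs (1 + (t : Int)) S =
      (pvWords cs (t + 1)).foldl
        (fun s w => PySem.Set.add s (String.ofList (w ++ ".google.com".toList))) S := by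
  unfold pvStepA
  have hexp : ((cs.length : Int) ^ (1 + (t : Int)).toNat) = ((cs.length ^ (t + 1) : Nat) : Int) := by
    have h : (1 + (t : Int)).toNat = t + 1 := by omega
    rw [h]; push_cast; ring
  rw [hexp, PySem.List.pyRange_zero_nat, List.foldl_map, ← map_pvDec_range_pow, List.foldl_map]
  refine PySem.List.foldl_congr_mem _ _ _ _ (fun acc x _hx => ?_)
  simp only [pvInner_eq]

lemma pvMain (cs : List Char) : ∀ (m : Nat) (S : PySem.Set String),
    ((List.range m).foldl (fun (S : PySem.Set String) (k : Nat) => pvStepA cs (1 + (k : Int)) S) S, pvWords cs m)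
      = (pvStepB cs)^[m] (S, [[]]) := by
  intro m
  induction m with
  | zero => intro S; rfl
  | succ m ih =>
      intro S
      rw [Function.iterate_succ_apply', ← ih S,
          List.range_succ, List.foldl_append, List.foldl_cons, List.foldl_nil]
      show _ = pvStepB cs (_, pvWords cs m)
      unfold pvStepB
      refine Prod.ext ?_ rfl
      exact pvStepA_words cs m _

-- ===== VERDICT (by name: the statement is the Claim_ definition above) =====
theorem generate_subdomains_spec : Claim_equal_generate_subdomains := by
  intro characters max_length _hdom
  show generate_subdomains characters max_length = generate_subdomains_alt characters max_length
  have hA : generate_subdomains characters max_length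
      = (PySem.List.pyRange 1 (max_length + 1) 1).foldl
          (fun S len => pvStepA characters.toList len S) PySem.Set.empty := rfl
  have hB : generate_subdomains_alt characters max_length
      = ((pvStepB characters.toList)^[(PySem.List.pyRange 0 max_length 1).length]
          (PySem.Set.empty, [[]])).1 := by
    show ((PySem.List.pyRange 0 max_length 1).foldl
        (fun st _ => pvStepB characters.toList st) (PySem.Set.empty, [[]])).1 = _
    rw [foldl_const_iterate]
  rw [hA, hB, PySem.List.length_pyRange_one, PySem.List.pyRange_one, List.foldl_map]
  have hm : (max_length + 1 - 1).toNat = (max_length - 0).toNat := by omega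
  rw [hm, ← pvMain characters.toList]
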